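-- pv_equiv track=rewrite | github.com/Sumedha494/DSA-Questions | non_decreasing_array.py | make_non_decreasing
-- ===== SOURCE A (Python) =====
-- def make_non_decreasing(arr):
--     """
--     Make array non-decreasing with minimum changes
--     Returns modified array and count of changes
--     """
--     arr = arr.copy()
--     changes = []
--
--     for i in range(1, len(arr)):
--         if arr[i] < arr[i - 1]:
--             old_value = arr[i]
--             arr[i] = arr[i - 1]  # Make equal to previous
--             changes.append({
--                 'index': i,
--                 'old': old_value,
--                 'new': arr[i]
--             })
--
--     return arr, changes
-- ===== SOURCE B (Python) =====
-- from itertools import accumulate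
--
-- def make_non_decreasing(arr):
--     # Two separate passes: result is the running prefix-maximum of arr,
--     # computed first; changes are then read off by re-comparing each
--     # original element with the prefix maximum before it.
--     result = list(accumulate(arr, lambda p, x: p if x < p else x))
--     changes = [{'index': i, 'old': arr[i], 'new': result[i - 1]}
--                for i in range(1, len(arr)) if arr[i] < result[i - 1]]
--     return result, changes
-- ===== Notes on version B (the rewrite author's own statement) =====
-- stated objective: alternative
-- what changed: Replaces the single mutating loop by two independent passes: the output array is computed first as the running prefix maximum (itertools.accumulate), and the change records are then derived by a comprehension comparing each original element with the prefix maximum before it.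
import Mathlib
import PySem

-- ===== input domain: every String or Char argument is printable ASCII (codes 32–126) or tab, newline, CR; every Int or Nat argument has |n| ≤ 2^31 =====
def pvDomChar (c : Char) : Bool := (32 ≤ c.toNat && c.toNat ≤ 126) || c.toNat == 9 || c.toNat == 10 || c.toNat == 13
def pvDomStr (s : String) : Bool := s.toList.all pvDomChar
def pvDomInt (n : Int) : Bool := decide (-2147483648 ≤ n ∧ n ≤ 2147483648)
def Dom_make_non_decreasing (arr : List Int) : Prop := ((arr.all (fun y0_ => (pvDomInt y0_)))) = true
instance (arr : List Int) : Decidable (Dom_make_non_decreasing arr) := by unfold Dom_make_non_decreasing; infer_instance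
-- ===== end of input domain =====

-- B replaces A's single mutating loop by two independent passes: a prefix-maximum scan
-- producing the output array, then a comprehension re-deriving the change records.


-- ===== PORT A =====
-- loop body of 'for i in range(1, len(arr))': reads arr[i], arr[i-1], possibly sets arr[i]
def stepA (st : List Int × List (List (String × Int))) (i : Int) :
    List Int × List (List (String × Int)) :=
  match PySem.List.pyGet? st.1 i, PySem.List.pyGet? st.1 (i - 1) with
  | some x, some p =>
      if x < p then
        (st.1.set i.toNat p, st.2 ++ [[("index", i), ("old", x), ("new", p)]])
      else st
  | _, _ => st

def make_non_decreasing (arr : List Int) : List Int × (List (List (String × Int))) :=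
  (PySem.List.pyRange 1 (arr.length : Int) 1).foldl stepA (arr, [])

-- ===== PORT B =====
-- the accumulate reducer: lambda p, x: p if x < p else x
def accStep (p x : Int) : Int := if x < p then p else x

-- result = list(accumulate(arr, accStep))
def prefMax (arr : List Int) : List Int :=
  match arr with
  | [] => []
  | h :: t => List.scanl accStep h t

-- one element of the comprehension: record iff arr[i] < result[i-1]
def stepB (arr res : List Int) (i : Int) : Option (List (String × Int)) :=
  match PySem.List.pyGet? arr i, PySem.List.pyGet? res (i - 1) with
  | some x, some p => if x < p then some [("index", i), ("old", x), ("new", p)] else none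
  | _, _ => none

def make_non_decreasing_alt (arr : List Int) : List Int × (List (List (String × Int))) :=
  let res := prefMax arr
  (res, (PySem.List.pyRange 1 (arr.length : Int) 1).filterMap (stepB arr res))

-- ===== PRECONDITION & SPEC =====
def Spec_make_non_decreasing (arr : List Int) (out : List Int × (List (List (String × Int)))) : Prop := out = make_non_decreasing_alt arr
instance (arr : List Int) (out : List Int × (List (List (String × Int)))) : Decidable (Spec_make_non_decreasing arr out) := by unfold Spec_make_non_decreasing; infer_instance

-- ===== CLAIM (what is proved, stated in full; the proofs are below) =====
def Claim_equal_make_non_decreasing : Prop := ∀ (arr : List Int), Dom_make_non_decreasing arr → Spec_make_non_decreasing arr (make_non_decreasing arr)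

-- ===== LEMMAS AND PROOFS =====

-- reference recursion: processing suffix l with previous (already-fixed) value prev,
-- current python index i; returns (fixed suffix, change records)
def goSpec (prev : Int) (l : List Int) (i : Int) :
    List Int × List (List (String × Int)) :=
  match l with
  | [] => ([], [])
  | x :: t =>
      if x < prev then
        let r := goSpec prev t (i + 1)
        (prev :: r.1, [("index", i), ("old", x), ("new", prev)] :: r.2)
      else
        let r := goSpec x t (i + 1)
        (x :: r.1, r.2)

theorem drop_pred_eq (a : List Int) (k : Nat) (prev : Int) (t : List Int)
    (h : a.drop (k - 1) = prev :: t) (hk : 1 ≤ k) : a.drop k = t := by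
  have : a.drop k = (a.drop (k - 1)).drop 1 := by
    rw [List.drop_drop]; congr 1; omega
  rw [this, h]; simp

theorem len_of_drop (a : List Int) (k : Nat) (prev : Int) (t : List Int)
    (h : a.drop (k - 1) = prev :: t) (hk : 1 ≤ k) : a.length = k + t.length := by
  have := congrArg List.length h
  simp [List.length_drop] at this
  omega

theorem getk_of_drop (a : List Int) (k : Nat) (x : Int) (t : List Int)
    (h : a.drop k = x :: t) : a[k]? = some x := by
  have h0 : (a.drop k)[0]? = a[k + 0]? := List.getElem?_drop
  rw [h] at h0
  simpa using h0.symm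

theorem A_loop (t : List Int) : ∀ (k : Nat) (a : List Int) (prev : Int)
    (cs : List (List (String × Int))), 1 ≤ k → a.drop (k - 1) = prev :: t →
    (PySem.List.pyRange (k : Int) (a.length : Int) 1).foldl stepA (a, cs)
      = (a.take (k - 1) ++ prev :: (goSpec prev t (k : Int)).1,
         cs ++ (goSpec prev t (k : Int)).2) := by
  induction t with
  | nil =>
    intro k a prev cs hk hd
    have hlen : a.length = k := by
      have := len_of_drop a k prev [] hd hk; simpa using this
    rw [PySem.List.pyRange_one_eq_nil (by exact_mod_cast le_of_eq hlen)]
    simp only [List.foldl_nil, goSpec, List.append_nil]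
    have ha : a.take (k - 1) ++ [prev] = a := by
      conv_rhs => rw [← List.take_append_drop (k - 1) a, hd]
    rw [ha]
  | cons x t ih =>
    intro k a prev cs hk hd
    have hdk : a.drop k = x :: t := drop_pred_eq a k prev (x :: t) hd hk
    have hlen : a.length = k + (x :: t).length := len_of_drop a k prev (x :: t) hd hk
    have hkl : (k : Int) < (a.length : Int) := by simp at hlen ⊢; omega
    rw [PySem.List.pyRange_one_cons hkl]
    have hgx : PySem.List.pyGet? a (k : Int) = some x := by
      rw [PySem.List.pyGet?_natCast, getk_of_drop a k x t hdk]
    have hgp : PySem.List.pyGet? a ((k : Int) - 1) = some prev := by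
      have : ((k : Int) - 1) = ((k - 1 : Nat) : Int) := by omega
      rw [this, PySem.List.pyGet?_natCast, getk_of_drop a (k - 1) prev (x :: t) hd]
    have htake : a.take k = a.take (k - 1) ++ [prev] := by
      have h1 : k - 1 < a.length := by simp at hlen; omega
      have hget : a[k - 1] = prev := by
        have := getk_of_drop a (k - 1) prev (x :: t) hd
        rw [List.getElem?_eq_getElem h1] at this
        exact Option.some.inj this
      have : a.take ((k - 1) + 1) = a.take (k - 1) ++ [a[k - 1]] :=
        List.take_succ_eq_append_getElem h1
      rw [hget] at this
      have hk1 : (k - 1) + 1 = k := by omega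
      rw [hk1] at this; exact this
    simp only [List.foldl_cons]
    by_cases hx : x < prev
    · have hstep : stepA (a, cs) (k : Int) =
          (a.set k prev, cs ++ [[("index", (k : Int)), ("old", x), ("new", prev)]]) := by
        simp only [stepA, hgx, hgp, if_pos hx]
        simp
      rw [hstep]
      have hset_drop : (a.set k prev).drop ((k + 1) - 1) = prev :: t := by
        have h3 : (k + 1) - 1 = k := by omega
        rw [h3, List.drop_set]
        simp [hdk]
      have := ih (k + 1) (a.set k prev) prev
        (cs ++ [[("index", (k : Int)), ("old", x), ("new", prev)]]) (by omega) hset_drop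
      rw [List.length_set] at this
      push_cast at this ⊢
      rw [this]
      have htakeset : (a.set k prev).take k = a.take (k - 1) ++ [prev] := by
        rw [List.take_set, List.set_eq_of_length_le (by simp), htake]
      rw [htakeset]
      simp [goSpec, hx]
    · have hstep : stepA (a, cs) (k : Int) = (a, cs) := by
        simp only [stepA, hgx, hgp, if_neg hx]
      rw [hstep]
      have hdrop2 : a.drop ((k + 1) - 1) = x :: t := by
        have : (k + 1) - 1 = k := by omega
        rw [this]; exact hdk
      have := ih (k + 1) a x cs (by omega) hdrop2
      push_cast at this ⊢
      rw [this, htake]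
      simp [goSpec, hx]

theorem scanl_eq_goSpec (t : List Int) : ∀ (prev : Int) (i : Int),
    List.scanl accStep prev t = prev :: (goSpec prev t i).1 := by
  induction t with
  | nil => intro prev i; simp [goSpec, List.scanl]
  | cons x t ih =>
    intro prev i
    rw [List.scanl_cons]
    by_cases hx : x < prev
    · have : accStep prev x = prev := by simp [accStep, hx]
      rw [this, ih prev (i + 1)]
      simp [goSpec, hx]
    · have : accStep prev x = x := by simp [accStep, hx]
      rw [this, ih x (i + 1)]
      simp [goSpec, hx]

theorem B_changes (t : List Int) : ∀ (k : Nat) (prev : Int) (A R : List Int),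
    1 ≤ k → A.drop k = t → R.drop (k - 1) = prev :: (goSpec prev t (k : Int)).1 →
    (PySem.List.pyRange (k : Int) (A.length : Int) 1).filterMap (stepB A R)
      = (goSpec prev t (k : Int)).2 := by
  induction t with
  | nil =>
    intro k prev A R hk hA hR
    have hlen : A.length ≤ k := by
      have := congrArg List.length hA; simp [List.length_drop] at this; omega
    rw [PySem.List.pyRange_one_eq_nil (by omega)]
    simp [goSpec]
  | cons x t ih =>
    intro k prev A R hk hA hR
    have hlen : A.length = k + (x :: t).length := by
      have := congrArg List.length hA; simp [List.length_drop] at this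
      simp; omega
    have hkl : (k : Int) < (A.length : Int) := by simp at hlen ⊢; omega
    rw [PySem.List.pyRange_one_cons hkl]
    have hgx : PySem.List.pyGet? A (k : Int) = some x := by
      rw [PySem.List.pyGet?_natCast, getk_of_drop A k x t hA]
    have hgp : PySem.List.pyGet? R ((k : Int) - 1) = some prev := by
      have h1 : ((k : Int) - 1) = ((k - 1 : Nat) : Int) := by omega
      rw [h1, PySem.List.pyGet?_natCast,
        getk_of_drop R (k - 1) prev (goSpec prev (x :: t) (k : Int)).1 hR]
    rw [List.filterMap_cons]
    by_cases hx : x < prev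
    · have hspec : goSpec prev (x :: t) (k : Int) =
          (prev :: (goSpec prev t ((k : Int) + 1)).1,
           [("index", (k : Int)), ("old", x), ("new", prev)] :: (goSpec prev t ((k : Int) + 1)).2) := by
        simp [goSpec, hx]
      have hstep : stepB A R (k : Int) = some [("index", (k : Int)), ("old", x), ("new", prev)] := by
        simp only [stepB, hgx, hgp, if_pos hx]
      rw [hstep]
      have hA' : A.drop (k + 1) = t := by
        have := drop_pred_eq A (k + 1) x t (by simpa using hA) (by omega)
        exact this
      have hR' : R.drop ((k + 1) - 1) = prev :: (goSpec prev t ((k + 1 : Nat) : Int)).1 := by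
        have h2 := drop_pred_eq R k prev _ hR hk
        have h3 : (k + 1) - 1 = k := by omega
        rw [h3, h2, hspec]
        push_cast
        simp
      have := ih (k + 1) prev A R (by omega) hA' hR'
      push_cast at this ⊢
      rw [this, hspec]
    · have hspec : goSpec prev (x :: t) (k : Int) =
          (x :: (goSpec x t ((k : Int) + 1)).1, (goSpec x t ((k : Int) + 1)).2) := by
        simp [goSpec, hx]
      have hstep : stepB A R (k : Int) = none := by
        simp only [stepB, hgx, hgp, if_neg hx]
      rw [hstep]
      have hA' : A.drop (k + 1) = t := by
        exact drop_pred_eq A (k + 1) x t (by simpa using hA) (by omega)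
      have hR' : R.drop ((k + 1) - 1) = x :: (goSpec x t ((k + 1 : Nat) : Int)).1 := by
        have h2 := drop_pred_eq R k prev _ hR hk
        have h3 : (k + 1) - 1 = k := by omega
        rw [h3, h2, hspec]
        push_cast
        simp
      have := ih (k + 1) x A R (by omega) hA' hR'
      push_cast at this ⊢
      rw [this, hspec]

-- ===== VERDICT (by name: the statement is the Claim_ definition above) =====
theorem make_non_decreasing_spec : Claim_equal_make_non_decreasing := by
  intro arr _
  unfold Spec_make_non_decreasing
  match arr with
  | [] => decide
  | h :: t =>
    unfold make_non_decreasing make_non_decreasing_alt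
    have hA := A_loop t 1 (h :: t) h [] (by omega) (by simp)
    simp only [Nat.cast_one] at hA
    rw [hA]
    have hres : prefMax (h :: t) = h :: (goSpec h t (1 : Int)).1 := by
      simp [prefMax, scanl_eq_goSpec t h 1]
    have hB := B_changes t 1 h (h :: t) (prefMax (h :: t)) (by omega) (by simp)
      (by rw [hres]; simp)
    simp only [Nat.cast_one] at hB
    rw [hres] at hB
    simp only [hres]
    simp
    exact hB.symm
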